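-- pv_equiv track=rewrite | github.com/mwt2212/job_finder | backend/app.py | _split_paragraphs_preserve_blanks
-- ===== SOURCE A (Python) =====
-- from typing import Any, Dict, List, Optional
--
-- def _split_paragraphs_preserve_blanks(text: str) -> List[str]:
--     if text is None:
--         return []
--     lines = text.splitlines()
--     parts: List[str] = []
--     buf: List[str] = []
--     saw_blank = False
--     for line in lines:
--         if line.strip() == "":
--             if buf:
--                 parts.append("\n".join(buf).strip())
--                 buf = []
--                 saw_blank = True
--             else:
--                 parts.append("")
--                 saw_blank = True
--         else:
--             buf.append(line)
--             saw_blank = False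
--     if buf:
--         parts.append("\n".join(buf).strip())
--     elif saw_blank:
--         parts.append("")
--     return parts
-- ===== SOURCE B (Python) =====
-- from itertools import groupby
-- from typing import List
--
-- def _split_paragraphs_preserve_blanks(text: str) -> List[str]:
--     if text is None:
--         return []
--     out: List[str] = []
--     first = True
--     last_blank = False
--     for is_blank, grp in groupby(text.splitlines(), key=lambda l: l.strip() == ""):
--         g = list(grp)
--         if is_blank:
--             out.extend([""] * (len(g) if first else len(g) - 1))
--             last_blank = True
--         else:
--             out.append("\n".join(g).strip())
--             last_blank = False
--         first = False
--     if last_blank: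
--         out.append("")
--     return out
-- ===== Notes on version B (the rewrite author's own statement) =====
-- stated objective: alternative
-- what changed: Replaces A's per-line state machine (buf/saw_blank flags with flushes) by grouping the lines into maximal blank/non-blank runs (itertools.groupby) and emitting each run's contribution at once: one stripped joined paragraph per non-blank run, k or k-1 empty strings per blank run, plus a trailing empty string when the text ends blank.
import Mathlib
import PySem

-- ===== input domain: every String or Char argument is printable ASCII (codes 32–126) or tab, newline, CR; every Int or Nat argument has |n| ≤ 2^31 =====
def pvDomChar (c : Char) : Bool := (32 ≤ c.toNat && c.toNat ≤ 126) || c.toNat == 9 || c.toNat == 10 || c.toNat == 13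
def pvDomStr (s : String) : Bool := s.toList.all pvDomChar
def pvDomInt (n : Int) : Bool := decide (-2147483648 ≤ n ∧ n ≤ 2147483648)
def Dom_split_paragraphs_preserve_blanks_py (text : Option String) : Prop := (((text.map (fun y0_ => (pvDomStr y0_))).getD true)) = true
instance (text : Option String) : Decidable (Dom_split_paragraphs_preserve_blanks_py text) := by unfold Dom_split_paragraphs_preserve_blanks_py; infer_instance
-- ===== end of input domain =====

-- B replaces A's per-line buf/saw_blank state machine by grouping lines into maximal
-- blank/non-blank runs and emitting each run's contribution at once (objective: alternative).

-- ===== PORT A =====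
-- line.strip() == ""  (shared test, transliterated once)
def pvBlank (l : String) : Bool := PySem.Str.strip l == ""
-- "\n".join(buf).strip()
def pvPara (b : List String) : String := PySem.Str.strip (PySem.Str.join "\n" b)

-- the for-loop of A over (parts, buf, saw_blank)
def pvLoopA (lines : List String) (st : List String × List String × Bool) :
    List String × List String × Bool :=
  lines.foldl (fun st line =>
    let (parts, buf, _) := st
    if pvBlank line then
      if buf ≠ [] then (parts ++ [pvPara buf], [], true)
      else (parts ++ [""], [], true)
    else (parts, buf ++ [line], false)) st

-- the code after the loop of A
def pvFinishA (st : List String × List String × Bool) : List String :=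
  if st.2.1 ≠ [] then st.1 ++ [pvPara st.2.1]
  else if st.2.2 then st.1 ++ [""]
  else st.1

def split_paragraphs_preserve_blanks_py (text : Option String) : List String :=
  match text with
  | none => []
  | some t => pvFinishA (pvLoopA (PySem.Str.splitlines t) ([], [], false))

-- ===== PORT B =====
-- itertools.groupby(lines, key=blankness): maximal runs of equal blankness
def pvChunks (xs : List String) : List (List String) :=
  match xs with
  | [] => []
  | x :: rest =>
    (x :: rest.takeWhile (fun y => pvBlank y == pvBlank x)) ::
      pvChunks (rest.dropWhile (fun y => pvBlank y == pvBlank x))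
termination_by xs.length
decreasing_by
  simp only [List.length_cons]
  exact Nat.lt_succ_of_le (List.length_dropWhile_le _ _)

-- the body of B's for-loop over (out, first, last_blank)
def pvStepB (st : List String × Bool × Bool) (g : List String) : List String × Bool × Bool :=
  let (out, first, _) := st
  if pvBlank (g.headD "") then
    (out ++ List.replicate (if first then g.length else g.length - 1) "", false, true)
  else
    (out ++ [pvPara g], false, false)

-- "if last_blank: out.append('')"
def pvFinishB (st : List String × Bool × Bool) : List String :=
  if st.2.2 then st.1 ++ [""] else st.1

def split_paragraphs_preserve_blanks_py_alt (text : Option String) : List String :=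
  match text with
  | none => []
  | some t =>
    pvFinishB ((pvChunks (PySem.Str.splitlines t)).foldl pvStepB ([], true, false))

-- ===== PRECONDITION & SPEC =====
def Spec_split_paragraphs_preserve_blanks_py (text : Option String) (out : List String) : Prop := out = split_paragraphs_preserve_blanks_py_alt text
instance (text : Option String) (out : List String) : Decidable (Spec_split_paragraphs_preserve_blanks_py text out) := by unfold Spec_split_paragraphs_preserve_blanks_py; infer_instance

-- ===== CLAIM (what is proved, stated in full; the proofs are below) =====
def Claim_equal_split_paragraphs_preserve_blanks_py : Prop := ∀ (text : Option String), Dom_split_paragraphs_preserve_blanks_py text → Spec_split_paragraphs_preserve_blanks_py text (split_paragraphs_preserve_blanks_py text)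

-- ===== LEMMAS AND PROOFS =====

-- A's loop over a run of non-blank lines just extends buf.
theorem pvLoopA_nonblank (t : List String) (out buf : List String) (saw : Bool)
    (h : ∀ l ∈ t, pvBlank l = false) :
    pvLoopA t (out, buf, saw) = (out, buf ++ t, if t.isEmpty then saw else false) := by
  induction t generalizing buf saw with
  | nil => simp [pvLoopA]
  | cons x t ih =>
    have hx : pvBlank x = false := h x (by simp)
    have ht : ∀ l ∈ t, pvBlank l = false := fun l hl => h l (by simp [hl])
    simp only [pvLoopA, List.foldl_cons] at *
    rw [hx]
    simp only [Bool.false_eq_true, if_false]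
    rw [ih (buf ++ [x]) false ht]
    cases t <;> simp

-- A's loop over a run of blank lines with empty buf appends one "" per line.
theorem pvLoopA_blank (t : List String) (out : List String)
    (h : ∀ l ∈ t, pvBlank l = true) :
    pvLoopA t (out, [], true) = (out ++ List.replicate t.length "", [], true) := by
  induction t generalizing out with
  | nil => simp [pvLoopA]
  | cons x t ih =>
    have hx : pvBlank x = true := h x (by simp)
    have ht : ∀ l ∈ t, pvBlank l = true := fun l hl => h l (by simp [hl])
    simp only [pvLoopA, List.foldl_cons] at *
    rw [hx]
    simp only [if_true, ne_eq, not_true_eq_false, if_false]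
    rw [ih (out ++ [""]) ht]
    simp [List.replicate_succ]

-- heads of dropWhile fail the predicate
theorem head?_dropWhile_false {p : String → Bool} (xs : List String) (h : String)
    (hh : (xs.dropWhile p).head? = some h) : p h = false := by
  induction xs with
  | nil => simp [List.dropWhile] at hh
  | cons x xs ih =>
    by_cases hx : p x = true
    · rw [List.dropWhile_cons_of_pos hx] at hh; exact ih hh
    · rw [List.dropWhile_cons_of_neg hx] at hh
      simp at hh
      subst hh
      simpa using hx

-- pvFinishB of a fold starting on a non-blank (or exhausted) input ignores the first flag.
theorem pvFirst_irrelevant (ls : List String) (out : List String) (saw : Bool)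
    (h : ∀ x, ls.head? = some x → pvBlank x = false) :
    pvFinishB ((pvChunks ls).foldl pvStepB (out, false, saw)) =
    pvFinishB ((pvChunks ls).foldl pvStepB (out, true, saw)) := by
  cases ls with
  | nil => cases saw <;> simp [pvChunks, pvFinishB]
  | cons x rest =>
    have hx : pvBlank x = false := h x rfl
    rw [pvChunks]
    simp only [List.foldl_cons, pvStepB, List.headD_cons, hx]
    simp

-- main invariant: processing the remaining lines agrees chunk-by-chunk, both
-- from a fresh state (part 1) and from a pending non-empty paragraph buffer
-- whose next line (if any) is blank (part 2).
theorem pvMain : ∀ n ls, ls.length ≤ n →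
    (∀ (out : List String) (saw : Bool),
        pvFinishA (pvLoopA ls (out, [], saw)) =
        pvFinishB ((pvChunks ls).foldl pvStepB (out, true, saw))) ∧
    (∀ (out b : List String), b ≠ [] →
        (∀ x, ls.head? = some x → pvBlank x = true) →
        pvFinishA (pvLoopA ls (out, b, false)) =
        pvFinishB ((pvChunks ls).foldl pvStepB (out ++ [pvPara b], false, false))) := by
  intro n
  induction n with
  | zero =>
    intro ls hls
    have : ls = [] := List.length_eq_zero_iff.mp (Nat.le_zero.mp hls)
    subst this
    constructor
    · intro out saw; cases saw <;> simp [pvLoopA, pvChunks, pvFinishA, pvFinishB]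
    · intro out b hb _; simp [pvLoopA, pvChunks, pvFinishA, pvFinishB, hb]
  | succ n ih =>
    intro ls hls
    cases ls with
    | nil =>
      constructor
      · intro out saw; cases saw <;> simp [pvLoopA, pvChunks, pvFinishA, pvFinishB]
      · intro out b hb _; simp [pvLoopA, pvChunks, pvFinishA, pvFinishB, hb]
    | cons x rest =>
      have hrest : rest.length ≤ n := Nat.lt_succ_iff.mp (by simpa using hls)
      set p : String → Bool := fun y => pvBlank y == pvBlank x with hp
      have htake : ∀ l ∈ rest.takeWhile p, pvBlank l = pvBlank x := by
        intro l hl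
        have := List.mem_takeWhile_imp hl
        simpa [hp] using this
      have hdroplen : (rest.dropWhile p).length ≤ n :=
        le_trans (List.length_dropWhile_le _ _) hrest
      have ihdrop := ih (rest.dropWhile p) hdroplen
      have hdrophead : ∀ h, (rest.dropWhile p).head? = some h → pvBlank h = !pvBlank x := by
        intro h hh
        have := head?_dropWhile_false (p := p) rest h hh
        simp only [hp] at this
        cases hb : pvBlank h <;> cases hbx : pvBlank x <;> simp [hb, hbx] at this ⊢
      have hsplit : x :: rest = (x :: rest.takeWhile p) ++ rest.dropWhile p := by
        simp [List.takeWhile_append_dropWhile]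
      -- processing the first chunk on the A side, depending on blankness and buffer
      by_cases hx : pvBlank x = true
      · -- first chunk is blank
        have hallb : ∀ l ∈ rest.takeWhile p, pvBlank l = true := by
          intro l hl; rw [htake l hl, hx]
        have hdropnb : ∀ h, (rest.dropWhile p).head? = some h → pvBlank h = false := by
          intro h hh; rw [hdrophead h hh, hx]; rfl
        constructor
        · intro out saw
          -- A: blank line with empty buf appends "", then the blank run, then the rest
          have : pvLoopA (x :: rest) (out, [], saw)
              = pvLoopA (rest.dropWhile p)
                  (out ++ List.replicate (rest.takeWhile p).length.succ "", [], true) := by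
            conv_lhs => rw [hsplit]
            simp only [pvLoopA, List.foldl_append, List.foldl_cons]
            rw [hx]
            simp only [if_true, ne_eq, not_true_eq_false, if_false]
            have := pvLoopA_blank (rest.takeWhile p) (out ++ [""]) hallb
            simp only [pvLoopA] at this
            rw [this]
            simp [List.replicate_succ]
          rw [this]
          -- B: first blank group of length k emits k empty strings
          rw [show pvChunks (x :: rest) = (x :: rest.takeWhile p) :: pvChunks (rest.dropWhile p) from by rw [pvChunks]]
          simp only [List.foldl_cons, pvStepB, List.headD_cons, hx, if_true, List.length_cons]
          rw [(ihdrop.1 (out ++ List.replicate (rest.takeWhile p).length.succ "") true)]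
          rw [pvFirst_irrelevant _ _ _ hdropnb]
        · intro out b hb _
          -- A: blank line flushes buf, then the blank run, then the rest
          have : pvLoopA (x :: rest) (out, b, false)
              = pvLoopA (rest.dropWhile p)
                  ((out ++ [pvPara b]) ++ List.replicate (rest.takeWhile p).length "", [], true) := by
            conv_lhs => rw [hsplit]
            simp only [pvLoopA, List.foldl_append, List.foldl_cons]
            rw [hx]
            simp only [if_true, hb, ne_eq, not_false_eq_true, if_true]
            have := pvLoopA_blank (rest.takeWhile p) (out ++ [pvPara b]) hallb
            simp only [pvLoopA] at this
            rw [this]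
          rw [this]
          -- B: non-first blank group of length k emits k-1 empty strings
          rw [show pvChunks (x :: rest) = (x :: rest.takeWhile p) :: pvChunks (rest.dropWhile p) from by rw [pvChunks]]
          simp only [List.foldl_cons, pvStepB, List.headD_cons, hx, if_true, List.length_cons,
            Bool.false_eq_true, if_false, Nat.succ_sub_one]
          rw [(ihdrop.1 ((out ++ [pvPara b]) ++ List.replicate (rest.takeWhile p).length "") true)]
          rw [pvFirst_irrelevant _ _ _ hdropnb]
      · -- first chunk is non-blank
        have hx' : pvBlank x = false := by simpa using hx
        have hallnb : ∀ l ∈ x :: rest.takeWhile p, pvBlank l = false := by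
          intro l hl
          rcases List.mem_cons.mp hl with h | h
          · rw [h]; exact hx'
          · rw [htake l h, hx']
        have hdropb : ∀ h, (rest.dropWhile p).head? = some h → pvBlank h = true := by
          intro h hh; rw [hdrophead h hh, hx']; rfl
        have hA : ∀ (out : List String) (saw : Bool),
            pvFinishA (pvLoopA (x :: rest) (out, [], saw)) =
            pvFinishB ((pvChunks (x :: rest)).foldl pvStepB (out, true, saw)) := by
          intro out saw
          have : pvLoopA (x :: rest) (out, [], saw)
              = pvLoopA (rest.dropWhile p) (out, x :: rest.takeWhile p, false) := by
            conv_lhs => rw [hsplit]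
            simp only [pvLoopA, List.foldl_append]
            have := pvLoopA_nonblank (x :: rest.takeWhile p) out [] saw hallnb
            simp only [pvLoopA] at this
            rw [this]
            simp
          rw [this]
          rw [show pvChunks (x :: rest) = (x :: rest.takeWhile p) :: pvChunks (rest.dropWhile p) from by rw [pvChunks]]
          simp only [List.foldl_cons, pvStepB, List.headD_cons, hx', Bool.false_eq_true, if_false]
          exact ihdrop.2 out (x :: rest.takeWhile p) (by simp) hdropb
        exact ⟨hA, fun out b hb hhead => by
          have := hhead x rfl
          rw [this] at hx'
          simp at hx'⟩

-- ===== VERDICT (by name: the statement is the Claim_ definition above) =====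
theorem split_paragraphs_preserve_blanks_py_spec : Claim_equal_split_paragraphs_preserve_blanks_py := by
  intro text _
  unfold Spec_split_paragraphs_preserve_blanks_py
  cases text with
  | none => rfl
  | some t =>
    exact (pvMain (PySem.Str.splitlines t).length (PySem.Str.splitlines t) le_rfl).1 [] false
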